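-- pv_equiv track=rewrite | github.com/HerunTarun/py110 | lesson1/selection_and_transformation.py | double_odd_numbers
-- ===== SOURCE A (Python) =====
-- def double_odd_numbers(numbers):
-- 	doubled_numbers = []
-- 	for index, num in enumerate(numbers):
-- 		if index % 2 != 0:
-- 			doubled_numbers.append(num * 2)
-- 		else:
-- 			doubled_numbers.append(num)
-- 	return doubled_numbers
-- ===== SOURCE B (Python) =====
-- def double_odd_numbers(numbers):
--     result = []
--     i = 0
--     n = len(numbers)
--     while i + 1 < n:
--         result.append(numbers[i])
--         result.append(numbers[i + 1] * 2)
--         i += 2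
--     if i < n:
--         result.append(numbers[i])
--     return result
-- ===== Notes on version B (the rewrite author's own statement) =====
-- stated objective: alternative
-- what changed: Replaced the enumerate-every-element loop with a per-element parity branch by a branchless two-at-a-time pair loop (append numbers[i], then numbers[i+1]*2, step 2) plus a trailing-element case.
import Mathlib
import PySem

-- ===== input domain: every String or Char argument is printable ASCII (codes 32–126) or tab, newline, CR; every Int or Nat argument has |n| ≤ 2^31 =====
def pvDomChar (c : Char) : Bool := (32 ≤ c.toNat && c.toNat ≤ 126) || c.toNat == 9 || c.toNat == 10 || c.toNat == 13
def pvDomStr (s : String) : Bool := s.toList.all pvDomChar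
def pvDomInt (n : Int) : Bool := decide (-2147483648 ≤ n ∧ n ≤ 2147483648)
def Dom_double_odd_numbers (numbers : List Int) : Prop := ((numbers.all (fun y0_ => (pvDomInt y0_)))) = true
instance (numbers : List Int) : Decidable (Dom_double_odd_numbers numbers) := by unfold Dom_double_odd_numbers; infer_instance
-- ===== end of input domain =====

-- B replaces A's enumerate-with-parity-branch pass by a two-at-a-time pair loop (alternative decomposition, same cost).
-- ===== PORT A =====
def double_odd_numbers (numbers : List Int) : List Int :=
  (PySem.List.enumerate numbers).foldl
    (fun doubled_numbers p =>
      if PySem.Int.mod p.1 2 ≠ 0 then doubled_numbers ++ [p.2 * 2]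
      else doubled_numbers ++ [p.2])
    []

-- ===== PORT B =====
-- Source B's while loop over index i (stepping by 2). Indices i, i+1 are in range at each
-- access, so pyGetD with default 0 is exact for Python's numbers[i].
def double_odd_numbers_altLoop (numbers : List Int) (i : Nat) (result : List Int) : List Int :=
  if i + 1 < numbers.length then
    double_odd_numbers_altLoop numbers (i + 2)
      (result ++ [PySem.List.pyGetD numbers i 0] ++ [PySem.List.pyGetD numbers (i + 1) 0 * 2])
  else if i < numbers.length then result ++ [PySem.List.pyGetD numbers i 0]
  else result
termination_by numbers.length - i

def double_odd_numbers_alt (numbers : List Int) : List Int :=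
  double_odd_numbers_altLoop numbers 0 []

-- ===== PRECONDITION & SPEC =====
def Spec_double_odd_numbers (numbers : List Int) (out : List Int) : Prop := out = double_odd_numbers_alt numbers
instance (numbers : List Int) (out : List Int) : Decidable (Spec_double_odd_numbers numbers out) := by unfold Spec_double_odd_numbers; infer_instance

-- ===== CLAIM (what is proved, stated in full; the proofs are below) =====
def Claim_equal_double_odd_numbers : Prop := ∀ (numbers : List Int), Dom_double_odd_numbers numbers → Spec_double_odd_numbers numbers (double_odd_numbers numbers)

-- ===== LEMMAS AND PROOFS =====

-- reference function: the common pair-structured value of both ports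
def pairSpec : List Int → List Int
  | [] => []
  | [x] => [x]
  | x :: y :: rest => x :: y * 2 :: pairSpec rest

theorem pyGetD_nat_lt (numbers : List Int) (i : Nat) (h : i < numbers.length) :
    PySem.List.pyGetD numbers (i : Int) 0 = numbers[i] := by
  rw [PySem.List.pyGetD_eq_getElem numbers 0 (by omega) (by exact_mod_cast h)]
  simp

theorem altLoop_eq_pairSpec (numbers : List Int) (i : Nat) (result : List Int) :
    double_odd_numbers_altLoop numbers i result = result ++ pairSpec (numbers.drop i) := by
  induction i, result using double_odd_numbers_altLoop.induct numbers with
  | case1 i result h ih =>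
      rw [double_odd_numbers_altLoop, if_pos h, ih]
      rw [List.drop_eq_getElem_cons (by omega : i < numbers.length),
          List.drop_eq_getElem_cons (by omega : i + 1 < numbers.length)]
      rw [pyGetD_nat_lt numbers i (by omega),
          show ((i : Int) + 1) = ((i + 1 : Nat) : Int) by push_cast; ring,
          pyGetD_nat_lt numbers (i + 1) (by omega)]
      simp [pairSpec]
  | case2 i result h1 h2 =>
      rw [double_odd_numbers_altLoop, if_neg h1, if_pos h2]
      rw [List.drop_eq_getElem_cons (by omega : i < numbers.length)]
      rw [pyGetD_nat_lt numbers i (by omega)]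
      have : numbers.drop (i + 1) = [] := by
        apply List.drop_eq_nil_of_le; omega
      rw [this]
      simp [pairSpec]
  | case3 i result h1 h2 =>
      rw [double_odd_numbers_altLoop, if_neg h1, if_neg h2]
      have : numbers.drop i = [] := by
        apply List.drop_eq_nil_of_le; omega
      rw [this]
      simp [pairSpec]

theorem A_foldl_eq_pairSpec (xs : List Int) (s : Int) (acc : List Int) (hs : s % 2 = 0) :
    (PySem.List.enumerate xs s).foldl
      (fun doubled_numbers p =>
        if PySem.Int.mod p.1 2 ≠ 0 then doubled_numbers ++ [p.2 * 2]
        else doubled_numbers ++ [p.2])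
      acc = acc ++ pairSpec xs := by
  induction xs using pairSpec.induct generalizing s acc with
  | case1 => simp [PySem.List.enumerate_nil, pairSpec]
  | case2 x =>
      have h1 : ¬ PySem.Int.mod s 2 ≠ 0 := by
        simp [PySem.Int.mod, Int.fmod_eq_emod]; omega
      simp only [PySem.List.enumerate_cons, PySem.List.enumerate_nil, List.foldl]
      rw [if_neg h1]
      simp [pairSpec]
  | case3 x y rest ih =>
      have h1 : ¬ PySem.Int.mod s 2 ≠ 0 := by
        simp [PySem.Int.mod, Int.fmod_eq_emod]; omega
      have h2 : PySem.Int.mod (s + 1) 2 ≠ 0 := by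
        simp [PySem.Int.mod, Int.fmod_eq_emod]; omega
      simp only [PySem.List.enumerate_cons, List.foldl]
      rw [if_neg h1, if_pos h2]
      rw [show s + 1 + 1 = s + 2 by ring, ih (s + 2) _ (by omega)]
      simp [pairSpec]

-- ===== VERDICT (by name: the statement is the Claim_ definition above) =====
theorem double_odd_numbers_spec : Claim_equal_double_odd_numbers := by
  intro numbers _
  unfold Spec_double_odd_numbers double_odd_numbers double_odd_numbers_alt
  rw [A_foldl_eq_pairSpec numbers 0 [] (by norm_num)]
  rw [altLoop_eq_pairSpec numbers 0 []]
  simp
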